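-- pv_equiv track=rewrite | github.com/Gebon/BMP | src/encoding.py | _encode_number_into_another_number
-- ===== SOURCE A (Python) =====
-- def _encode_number_into_another_number(coded_number, container_number, used_bits_per_byte, shift_of_coded_number):
--     """
--     Function that encodes number into container number with specified bits per byte used to encode (used_bits_per_byte)
--     :param coded_number: integer value to be encoded within container
--     :param used_bits_per_byte: count of bits used in each byte to encode coded_element
--     :param container_number: target number which used to store encoded data
--     :param shift_of_coded_number: specifies which part of number should be encoded into container
--     :return: tuple (container_number, shift_of_coded_number), where container_number already contains encoded data
--     """
--     shift_within_container_number = used_bits_per_byte - 1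
--     while shift_of_coded_number >= 0 and shift_within_container_number >= 0:
--         if coded_number >> shift_of_coded_number & 1:
--             container_number |= 1 << shift_within_container_number  # set (8 - i)-th bit to 1
--         else:
--             container_number &= ~(1 << shift_within_container_number)  # set (8 - i)-th bit to 0
--         shift_of_coded_number -= 1
--         shift_within_container_number -= 1
--
--     return container_number, shift_of_coded_number
-- ===== SOURCE B (Python) =====
-- def _encode_number_into_another_number(coded_number, container_number, used_bits_per_byte, shift_of_coded_number):
--     """Single mask-extract-insert instead of the bit-by-bit loop."""
--     n = max(0, min(shift_of_coded_number + 1, used_bits_per_byte))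
--     if n == 0:
--         return container_number, shift_of_coded_number
--     top = used_bits_per_byte - 1
--     mask = ((1 << n) - 1) << (top - n + 1)
--     d = shift_of_coded_number - top
--     src = coded_number >> d if d >= 0 else coded_number << -d
--     return (container_number & ~mask) | (src & mask), shift_of_coded_number - n
-- ===== Notes on version B (the rewrite author's own statement) =====
-- stated objective: faster
-- what changed: Replaces the bit-by-bit while loop with a single mask-extract-insert: compute the number of copied bits n, build one contiguous mask, shift the source field into place, and blend it into the container with one and/or step.
import Mathlib
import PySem

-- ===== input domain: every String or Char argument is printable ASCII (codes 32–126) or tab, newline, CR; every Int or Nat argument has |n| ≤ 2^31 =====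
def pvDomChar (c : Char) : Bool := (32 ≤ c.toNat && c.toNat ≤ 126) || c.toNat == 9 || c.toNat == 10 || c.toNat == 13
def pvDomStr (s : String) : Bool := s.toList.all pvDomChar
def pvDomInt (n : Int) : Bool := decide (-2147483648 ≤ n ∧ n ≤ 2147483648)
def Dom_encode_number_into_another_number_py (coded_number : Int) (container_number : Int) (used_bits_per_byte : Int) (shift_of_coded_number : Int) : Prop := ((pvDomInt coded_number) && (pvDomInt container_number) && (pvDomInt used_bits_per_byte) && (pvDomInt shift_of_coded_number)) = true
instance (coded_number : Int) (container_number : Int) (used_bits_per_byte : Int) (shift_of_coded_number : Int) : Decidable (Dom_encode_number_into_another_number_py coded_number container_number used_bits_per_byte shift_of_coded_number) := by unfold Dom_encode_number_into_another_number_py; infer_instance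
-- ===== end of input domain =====

-- ===== PORT A =====
-- B replaces A's bit-by-bit copy loop with one mask-extract-insert step (objective: simpler).
-- while loop of _encode_number_into_another_number, transliterated
def pyWhileEncode (coded_number : Int) (container_number : Int)
    (shift_of_coded_number : Int) (shift_within_container_number : Int) : Int × Int :=
  if h : 0 ≤ shift_of_coded_number ∧ 0 ≤ shift_within_container_number then
    let container' :=
      if PySem.Int.band (coded_number >>> shift_of_coded_number.toNat) 1 ≠ 0 then
        PySem.Int.bor container_number ((1:Int) <<< shift_within_container_number.toNat)
      else
        PySem.Int.band container_number (Int.not ((1:Int) <<< shift_within_container_number.toNat))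
    pyWhileEncode coded_number container' (shift_of_coded_number - 1) (shift_within_container_number - 1)
  else (container_number, shift_of_coded_number)
termination_by (shift_within_container_number + 1).toNat
decreasing_by omega

def encode_number_into_another_number_py (coded_number : Int) (container_number : Int)
    (used_bits_per_byte : Int) (shift_of_coded_number : Int) : Int × Int :=
  pyWhileEncode coded_number container_number shift_of_coded_number (used_bits_per_byte - 1)

-- ===== PORT B =====
def encode_number_into_another_number_py_alt (coded_number : Int) (container_number : Int)
    (used_bits_per_byte : Int) (shift_of_coded_number : Int) : Int × Int :=
  let n := max 0 (min (shift_of_coded_number + 1) used_bits_per_byte)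
  if n = 0 then (container_number, shift_of_coded_number)
  else
    let top := used_bits_per_byte - 1
    let mask := (((1:Int) <<< n.toNat) - 1) <<< (top - n + 1).toNat
    let d := shift_of_coded_number - top
    let src := if 0 ≤ d then coded_number >>> d.toNat else coded_number <<< (-d).toNat
    (PySem.Int.bor (PySem.Int.band container_number (Int.not mask)) (PySem.Int.band src mask),
     shift_of_coded_number - n)

-- ===== PRECONDITION & SPEC =====
def Spec_encode_number_into_another_number_py (coded_number : Int) (container_number : Int) (used_bits_per_byte : Int) (shift_of_coded_number : Int) (out : Int × Int) : Prop := out = encode_number_into_another_number_py_alt coded_number container_number used_bits_per_byte shift_of_coded_number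
instance (coded_number : Int) (container_number : Int) (used_bits_per_byte : Int) (shift_of_coded_number : Int) (out : Int × Int) : Decidable (Spec_encode_number_into_another_number_py coded_number container_number used_bits_per_byte shift_of_coded_number out) := by unfold Spec_encode_number_into_another_number_py; infer_instance

-- ===== CLAIM (what is proved, stated in full; the proofs are below) =====
def Claim_equal_encode_number_into_another_number_py : Prop := ∀ (coded_number : Int) (container_number : Int) (used_bits_per_byte : Int) (shift_of_coded_number : Int), Dom_encode_number_into_another_number_py coded_number container_number used_bits_per_byte shift_of_coded_number → Spec_encode_number_into_another_number_py coded_number container_number used_bits_per_byte shift_of_coded_number (encode_number_into_another_number_py coded_number container_number used_bits_per_byte shift_of_coded_number)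

-- ===== LEMMAS AND PROOFS =====
theorem pvShlPredBit (n k i : Nat) :
    (n * 2^k + (2^k - 1)).testBit i = if i < k then true else n.testBit (i - k) := by
  rcases Nat.lt_or_ge i k with h | h
  · obtain ⟨j, rfl⟩ : ∃ j, k = i + j + 1 := ⟨k - i - 1, by omega⟩
    have h1 : (0:Nat) < 2^i := Nat.two_pow_pos i
    have h2 : (0:Nat) < 2^j := Nat.two_pow_pos j
    have hx : n * 2^(i+j+1) + (2^(i+j+1) - 1)
        = 2^i * (n * (2^j * 2) + (2^j * 2 - 1)) + (2^i - 1) := by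
      zify [Nat.one_le_two_pow, show (1:Nat) ≤ 2^j*2 from by omega]
      ring
    have e2 : (n * (2^j * 2) + (2^j * 2 - 1)) % 2 = 1 := by
      have : n * (2^j*2) = 2*(n*2^j) := by ring
      rw [this]; omega
    rw [hx, Nat.testBit_eq_decide_div_mod_eq, Nat.mul_add_div h1,
        Nat.div_eq_of_lt (show 2^i - 1 < 2^i by omega), Nat.add_zero, if_pos h, e2]
    simp
  · obtain ⟨j, rfl⟩ : ∃ j, i = k + j := ⟨i - k, by omega⟩
    have h1 : (0:Nat) < 2^k := Nat.two_pow_pos k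
    rw [Nat.testBit_eq_decide_div_mod_eq, Nat.testBit_eq_decide_div_mod_eq,
        if_neg (by omega)]
    have e : (n * 2^k + (2^k - 1)) / 2^(k+j) = n / 2^j := by
      rw [pow_add, ← Nat.div_div_eq_div_mul, mul_comm n, Nat.mul_add_div h1,
          Nat.div_eq_of_lt (show 2^k - 1 < 2^k by omega), Nat.add_zero]
    rw [e, Nat.add_sub_cancel_left]

theorem pvSubAndEqLdiff (m n : Nat) : m - (m &&& n) = Nat.ldiff m n := by
  induction m using Nat.strong_induction_on generalizing n with
  | _ m ih =>
    rcases Nat.eq_zero_or_pos m with h | h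
    · subst h
      simp only [Nat.zero_and, Nat.sub_zero]
      apply Nat.eq_of_testBit_eq
      intro i
      simp [Nat.testBit_ldiff]
    · have hA2 : (m &&& n) / 2 = (m/2) &&& (n/2) := Nat.and_div_two
      have hD2 : (Nat.ldiff m n) / 2 = Nat.ldiff (m/2) (n/2) := by
        apply Nat.eq_of_testBit_eq; intro i
        simp [Nat.testBit_div_two, Nat.testBit_ldiff]
      have hIH := ih (m/2) (by omega) (n/2)
      have hle : (m/2) &&& (n/2) ≤ m/2 := Nat.and_le_left
      have hA0 : (m &&& n) % 2 = 1 ↔ (m % 2 = 1 ∧ n % 2 = 1) := by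
        have hh := Nat.testBit_land m n 0
        simp only [Nat.testBit_zero, ← Bool.decide_and, decide_eq_decide] at hh
        exact hh
      have hD0 : (Nat.ldiff m n) % 2 = 1 ↔ (m % 2 = 1 ∧ ¬ n % 2 = 1) := by
        have hh := Nat.testBit_ldiff m n 0
        simp only [Nat.testBit_zero, ← decide_not, ← Bool.decide_and, decide_eq_decide] at hh
        exact hh
      omega

-- Int layer
theorem pvIntExt (a b : Int) (h : ∀ i, a.testBit i = b.testBit i) : a = b := by
  cases a with
  | ofNat m =>
    cases b with
    | ofNat n =>
      have := Nat.eq_of_testBit_eq (x := m) (y := n) (fun i => by simpa [Int.testBit] using h i)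
      simp [this]
    | negSucc n =>
      exfalso
      have hm := Nat.testBit_eq_false_of_lt (n := m) (i := m + n) (by calc m < 2^m := Nat.lt_two_pow_self
                                                                        _ ≤ 2^(m+n) := Nat.pow_le_pow_right (by omega) (by omega))
      have hn := Nat.testBit_eq_false_of_lt (n := n) (i := m + n) (by calc n < 2^n := Nat.lt_two_pow_self
                                                                        _ ≤ 2^(m+n) := Nat.pow_le_pow_right (by omega) (by omega))
      have := h (m + n)
      simp [Int.testBit, hm, hn] at this
  | negSucc m =>
    cases b with
    | ofNat n =>
      exfalso
      have hm := Nat.testBit_eq_false_of_lt (n := m) (i := m + n) (by calc m < 2^m := Nat.lt_two_pow_self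
                                                                        _ ≤ 2^(m+n) := Nat.pow_le_pow_right (by omega) (by omega))
      have hn := Nat.testBit_eq_false_of_lt (n := n) (i := m + n) (by calc n < 2^n := Nat.lt_two_pow_self
                                                                        _ ≤ 2^(m+n) := Nat.pow_le_pow_right (by omega) (by omega))
      have := h (m + n)
      simp [Int.testBit, hm, hn] at this
    | negSucc n =>
      have := Nat.eq_of_testBit_eq (x := m) (y := n) (fun i => by
        have := h i
        simpa [Int.testBit] using this)
      simp [this]

theorem pvBandEqLand (a b : Int) : PySem.Int.band a b = Int.land a b := by
  cases a with
  | ofNat m =>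
    cases b with
    | ofNat n => simp [PySem.Int.band, Int.land]
    | negSucc n =>
      simp only [PySem.Int.band, Int.land]
      rw [if_pos (show (0:Int) ≤ Int.ofNat m from Int.natCast_nonneg m), if_neg (not_le.mpr (Int.negSucc_lt_zero n))]
      have h1 : (-Int.negSucc n - 1).toNat = n := by simp [Int.negSucc_eq]
      have h2 : ((Int.ofNat m).toNat) = m := rfl
      rw [h1, h2, pvSubAndEqLdiff]
  | negSucc m =>
    cases b with
    | ofNat n =>
      simp only [PySem.Int.band, Int.land]
      rw [if_neg (not_le.mpr (Int.negSucc_lt_zero m)), if_pos (show (0:Int) ≤ Int.ofNat n from Int.natCast_nonneg n)]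
      have h1 : (-Int.negSucc m - 1).toNat = m := by simp [Int.negSucc_eq]
      have h2 : ((Int.ofNat n).toNat) = n := rfl
      rw [h1, h2, pvSubAndEqLdiff]
    | negSucc n =>
      simp only [PySem.Int.band, Int.land]
      rw [if_neg (not_le.mpr (Int.negSucc_lt_zero m)), if_neg (not_le.mpr (Int.negSucc_lt_zero n))]
      have h1 : (-Int.negSucc m - 1).toNat = m := by simp [Int.negSucc_eq]
      have h2 : (-Int.negSucc n - 1).toNat = n := by simp [Int.negSucc_eq]
      rw [h1, h2]
      simp [Int.negSucc_eq]
      omega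

theorem pvBorEqLor (a b : Int) : PySem.Int.bor a b = Int.lor a b := by
  cases a with
  | ofNat m =>
    cases b with
    | ofNat n => simp [PySem.Int.bor, Int.lor]
    | negSucc n =>
      simp only [PySem.Int.bor, Int.lor]
      rw [if_pos (show (0:Int) ≤ Int.ofNat m from Int.natCast_nonneg m),
          if_neg (not_le.mpr (Int.negSucc_lt_zero n))]
      have h1 : (-Int.negSucc n - 1).toNat = n := by simp [Int.negSucc_eq]
      rw [h1, show ((Int.ofNat m).toNat) = m from rfl, pvSubAndEqLdiff]
      simp [Int.negSucc_eq]; omega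
  | negSucc m =>
    cases b with
    | ofNat n =>
      simp only [PySem.Int.bor, Int.lor]
      rw [if_neg (not_le.mpr (Int.negSucc_lt_zero m)),
          if_pos (show (0:Int) ≤ Int.ofNat n from Int.natCast_nonneg n)]
      have h1 : (-Int.negSucc m - 1).toNat = m := by simp [Int.negSucc_eq]
      rw [h1, show ((Int.ofNat n).toNat) = n from rfl, pvSubAndEqLdiff]
      simp [Int.negSucc_eq]; omega
    | negSucc n =>
      simp only [PySem.Int.bor, Int.lor]
      rw [if_neg (not_le.mpr (Int.negSucc_lt_zero m)),
          if_neg (not_le.mpr (Int.negSucc_lt_zero n))]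
      have h1 : (-Int.negSucc m - 1).toNat = m := by simp [Int.negSucc_eq]
      have h2 : (-Int.negSucc n - 1).toNat = n := by simp [Int.negSucc_eq]
      rw [h1, h2]
      simp [Int.negSucc_eq]; omega

theorem pvTbBand (a b : Int) (i : Nat) :
    (PySem.Int.band a b).testBit i = (a.testBit i && b.testBit i) := by
  rw [pvBandEqLand]; exact Int.testBit_land a b i

theorem pvTbBor (a b : Int) (i : Nat) :
    (PySem.Int.bor a b).testBit i = (a.testBit i || b.testBit i) := by
  rw [pvBorEqLor]; exact Int.testBit_lor a b i

theorem pvTbNot (a : Int) (i : Nat) : (Int.not a).testBit i = !a.testBit i := by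
  cases a <;> simp [Int.not, Int.testBit]

theorem pvTbShr (a : Int) (k i : Nat) : (a >>> k).testBit i = a.testBit (i + k) := by
  cases a with
  | ofNat n =>
    show (Int.ofNat (n >>> k)).testBit i = (Int.ofNat n).testBit (i + k)
    simp [Int.testBit, Nat.testBit_shiftRight, Nat.add_comm]
  | negSucc n =>
    show (Int.negSucc (n >>> k)).testBit i = (Int.negSucc n).testBit (i + k)
    simp [Int.testBit, Nat.testBit_shiftRight, Nat.add_comm]

theorem pvTbShl (a : Int) (k i : Nat) :
    (a <<< k).testBit i = (decide (k ≤ i) && a.testBit (i - k)) := by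
  cases a with
  | ofNat n =>
    show (Int.ofNat (n <<< k)).testBit i = _
    simp [Int.testBit, Nat.testBit_shiftLeft]
  | negSucc n =>
    show (Int.negSucc ((n+1) <<< k - 1)).testBit i = _
    have e1 : (n+1) <<< k = n * 2^k + 2^k := by rw [Nat.shiftLeft_eq]; ring
    have e2 : (n+1) <<< k - 1 = n * 2^k + (2^k - 1) := by
      have := Nat.two_pow_pos k; omega
    rw [e2]
    simp only [Int.testBit, pvShlPredBit]
    rcases Nat.lt_or_ge i k with h | h
    · simp [if_pos h, decide_eq_false (by omega : ¬ k ≤ i)]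
    · simp [if_neg (by omega : ¬ i < k), decide_eq_true (by omega : k ≤ i)]

theorem pvOneShl (n : Nat) : ((1:Int) <<< n) = Int.ofNat (2^n) := by
  show Int.ofNat (1 <<< n) = Int.ofNat (2^n)
  rw [Nat.one_shiftLeft]

theorem pvTbMask (n lo i : Nat) :
    ((((1:Int) <<< n) - 1) <<< lo).testBit i = (decide (lo ≤ i) && decide (i - lo < n)) := by
  have e1 : ((1:Int) <<< n) - 1 = Int.ofNat (2^n - 1) := by
    rw [pvOneShl]
    have := Nat.one_le_two_pow (n := n)
    simp only [Int.ofNat_eq_natCast]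
    omega
  rw [e1]
  show (Int.ofNat ((2^n - 1) <<< lo)).testBit i = _
  simp [Int.testBit, Nat.testBit_shiftLeft, Nat.testBit_two_pow_sub_one]

theorem pvTbOne (w i : Nat) : ((1:Int) <<< w).testBit i = decide (w = i) := by
  rw [pvOneShl]
  show Nat.testBit (2^w) i = decide (w = i)
  exact Nat.testBit_two_pow

theorem pvTbZeroLit (i : Nat) : (0:Int).testBit i = false := by
  show Nat.testBit 0 i = false; simp

theorem pvTbOneLit (i : Nat) : (1:Int).testBit i = decide (0 = i) := by
  show Nat.testBit (2^0) i = decide (0 = i)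
  exact Nat.testBit_two_pow

theorem pvBandOneNe (x : Int) : (PySem.Int.band x 1 ≠ 0) ↔ x.testBit 0 = true := by
  have e : PySem.Int.band x 1 = if x.testBit 0 then 1 else 0 := by
    apply pvIntExt
    intro i
    rw [pvTbBand, pvTbOneLit]
    cases h : x.testBit 0 <;> by_cases hi : i = 0 <;>
      simp [h, hi, pvTbZeroLit, pvTbOneLit] <;> omega
  rw [e]
  cases h : x.testBit 0 <;> simp


-- closed form of the loop, generalized to an arbitrary top position w (= used_bits_per_byte - 1)
def pvG (coded c s w : Int) : Int × Int :=
  if 0 ≤ s ∧ 0 ≤ w then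
    let n := min (s + 1) (w + 1)
    let mask := (((1:Int) <<< n.toNat) - 1) <<< (w + 1 - n).toNat
    let src := if 0 ≤ s - w then coded >>> (s - w).toNat else coded <<< (w - s).toNat
    (PySem.Int.bor (PySem.Int.band c (Int.not mask)) (PySem.Int.band src mask), s - n)
  else (c, s)

theorem pvTbSet (c : Int) (t : Bool) (w i : Nat) :
    ((if t = true then PySem.Int.bor c ((1:Int) <<< w)
      else PySem.Int.band c (Int.not ((1:Int) <<< w))).testBit i)
      = if i = w then t else c.testBit i := by
  cases t
  · simp only [Bool.false_eq_true, if_false]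
    rw [pvTbBand, pvTbNot, pvTbOne]
    by_cases hi : i = w
    · simp [hi]
    · simp [hi, Ne.symm hi]
  · simp only [if_true]
    rw [pvTbBor, pvTbOne]
    by_cases hi : i = w
    · simp [hi]
    · simp [hi, Ne.symm hi]

theorem pvTbSrc (coded : Int) (s w : Int) (hs : 0 ≤ s) (hw : 0 ≤ w) (i : Nat)
    (hi : w.toNat ≤ i + s.toNat) :
    ((if 0 ≤ s - w then coded >>> (s - w).toNat else coded <<< (w - s).toNat).testBit i)
      = coded.testBit (i + s.toNat - w.toNat) := by
  by_cases hd : 0 ≤ s - w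
  · rw [if_pos hd, pvTbShr]
    congr 1
    omega
  · rw [if_neg hd, pvTbShl, decide_eq_true (show (w - s).toNat ≤ i by omega), Bool.true_and]
    congr 1
    omega

theorem pvG_step (coded c s w : Int) (hs : 0 ≤ s) (hw : 0 ≤ w) :
    pvG coded
      (if PySem.Int.band (coded >>> s.toNat) 1 ≠ 0 then
        PySem.Int.bor c ((1:Int) <<< w.toNat)
      else PySem.Int.band c (Int.not ((1:Int) <<< w.toNat)))
      (s - 1) (w - 1)
      = pvG coded c s w := by
  have hb : (PySem.Int.band (coded >>> s.toNat) 1 ≠ 0) ↔ coded.testBit s.toNat = true := by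
    rw [pvBandOneNe, pvTbShr, Nat.zero_add]
  have hc : (if PySem.Int.band (coded >>> s.toNat) 1 ≠ 0 then
        PySem.Int.bor c ((1:Int) <<< w.toNat)
      else PySem.Int.band c (Int.not ((1:Int) <<< w.toNat)))
      = (if coded.testBit s.toNat = true then PySem.Int.bor c ((1:Int) <<< w.toNat)
         else PySem.Int.band c (Int.not ((1:Int) <<< w.toNat))) := by
    by_cases h : coded.testBit s.toNat = true
    · rw [if_pos (hb.mpr h), if_pos h]
    · rw [if_neg (fun hh => h (hb.mp hh)), if_neg h]
  rw [hc]
  have hsw : 0 ≤ s ∧ 0 ≤ w := ⟨hs, hw⟩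
  simp only [pvG]
  by_cases hg : 0 ≤ s - 1 ∧ 0 ≤ w - 1
  · rw [if_pos hg, if_pos hsw]
    have hn : min (s - 1 + 1) (w - 1 + 1) = min (s + 1) (w + 1) - 1 := by omega
    rw [hn, show s - 1 - (w - 1) = s - w from by ring, show w - 1 - (s - 1) = w - s from by ring,
        show w - 1 + 1 - (min (s + 1) (w + 1) - 1) = w + 1 - min (s + 1) (w + 1) from by ring]
    congr 1
    · apply pvIntExt
      intro i
      simp only [pvTbSet, pvTbBor, pvTbBand, pvTbNot, pvTbMask]
      by_cases hi : i = w.toNat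
      · rw [if_pos hi]
        have hm1 : (decide ((w + 1 - min (s + 1) (w + 1)).toNat ≤ i) &&
            decide (i - (w + 1 - min (s + 1) (w + 1)).toNat < (min (s + 1) (w + 1) - 1).toNat)) = false := by
          rw [← Bool.decide_and]; apply decide_eq_false; omega
        have hm2 : (decide ((w + 1 - min (s + 1) (w + 1)).toNat ≤ i) &&
            decide (i - (w + 1 - min (s + 1) (w + 1)).toNat < (min (s + 1) (w + 1)).toNat)) = true := by
          rw [← Bool.decide_and]; apply decide_eq_true; omega
        rw [hm1, hm2]
        subst hi
        rw [pvTbSrc coded s w hs hw w.toNat (by omega),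
            show w.toNat + s.toNat - w.toNat = s.toNat from by omega]
        simp
      · rw [if_neg hi]
        have hmm : (decide ((w + 1 - min (s + 1) (w + 1)).toNat ≤ i) &&
            decide (i - (w + 1 - min (s + 1) (w + 1)).toNat < (min (s + 1) (w + 1) - 1).toNat))
            = (decide ((w + 1 - min (s + 1) (w + 1)).toNat ≤ i) &&
            decide (i - (w + 1 - min (s + 1) (w + 1)).toNat < (min (s + 1) (w + 1)).toNat)) := by
          rw [← Bool.decide_and, ← Bool.decide_and]
          exact decide_eq_decide.mpr (by omega)
        rw [hmm]
    · omega
  · rw [if_neg hg, if_pos hsw]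
    have hn : min (s + 1) (w + 1) = 1 := by omega
    rw [hn, show (1:Int).toNat = 1 from rfl, show w + 1 - 1 = w from by ring]
    congr 1
    apply pvIntExt
    intro i
    simp only [pvTbSet, pvTbBor, pvTbBand, pvTbNot, pvTbMask]
    by_cases hi : i = w.toNat
    · rw [if_pos hi]
      have hm2 : (decide (w.toNat ≤ i) && decide (i - w.toNat < 1)) = true := by
        rw [← Bool.decide_and]; apply decide_eq_true; omega
      rw [hm2]
      subst hi
      rw [pvTbSrc coded s w hs hw w.toNat (by omega),
          show w.toNat + s.toNat - w.toNat = s.toNat from by omega]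
      simp
    · rw [if_neg hi]
      have hm1 : (decide (w.toNat ≤ i) && decide (i - w.toNat < 1)) = false := by
        rw [← Bool.decide_and]; apply decide_eq_false; omega
      rw [hm1]
      simp

theorem pyWhile_eq_pvG (k : Nat) : ∀ (coded c s w : Int), (w + 1).toNat ≤ k →
    pyWhileEncode coded c s w = pvG coded c s w := by
  induction k with
  | zero =>
    intro coded c s w hk
    rw [pyWhileEncode, pvG]
    rw [dif_neg (by omega), if_neg (by omega)]
  | succ k ih =>
    intro coded c s w hk
    by_cases h : 0 ≤ s ∧ 0 ≤ w
    · rw [pyWhileEncode, dif_pos h]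
      rw [ih coded _ (s - 1) (w - 1) (by omega)]
      exact pvG_step coded c s w h.1 h.2
    · rw [pyWhileEncode, pvG, dif_neg h, if_neg h]

theorem pvAlt_eq_pvG (coded c ubb s : Int) :
    encode_number_into_another_number_py_alt coded c ubb s = pvG coded c s (ubb - 1) := by
  simp only [encode_number_into_another_number_py_alt, pvG]
  by_cases hg : 0 ≤ s ∧ 0 ≤ ubb - 1
  · rw [if_pos hg, if_neg (show ¬ (max 0 (min (s+1) ubb) = 0) by omega)]
    have hmax : max 0 (min (s+1) ubb) = min (s+1) (ubb - 1 + 1) := by omega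
    rw [hmax]
    have e1 : ubb - 1 - min (s+1) (ubb-1+1) + 1 = ubb - 1 + 1 - min (s+1) (ubb-1+1) := by ring
    rw [e1, show (-(s - (ubb - 1))) = ubb - 1 - s from by ring]
  · rw [if_neg hg, if_pos (show max 0 (min (s+1) ubb) = 0 by omega)]

-- ===== VERDICT (by name: the statement is the Claim_ definition above) =====
theorem encode_number_into_another_number_py_spec : Claim_equal_encode_number_into_another_number_py := by
  intro coded c ubb s _
  unfold Spec_encode_number_into_another_number_py
  unfold encode_number_into_another_number_py
  rw [pyWhile_eq_pvG (ubb - 1 + 1).toNat coded c s (ubb - 1) (by omega), pvAlt_eq_pvG]
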